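-- pv_equiv track=rewrite | github.com/Sheridan/egs-tools | empyrion/parsers/ecf.py | _hasColonOutsideQuotes
-- ===== SOURCE A (Python) =====
-- def _hasColonOutsideQuotes(s):
--   in_single_quotes = False
--   in_double_quotes = False
--
--   for char in s:
--       if char == "'" and not in_double_quotes:
--           in_single_quotes = not in_single_quotes
--       elif char == '"' and not in_single_quotes:
--           in_double_quotes = not in_double_quotes
--       elif char == ':' and not in_single_quotes and not in_double_quotes:
--           return True
--
--   return False
-- ===== SOURCE B (Python) =====
-- import re
--
-- _QUOTED = re.compile(r"'[^']*'?|\"[^\"]*\"?")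
--
-- def _hasColonOutsideQuotes(s):
--   return ':' in _QUOTED.sub('', s)
-- ===== Notes on version B (the rewrite author's own statement) =====
-- stated objective: idiomatic
-- what changed: Replaces the hand-rolled two-flag quote state machine with a single regex substitution that deletes quoted spans (with an optional closing quote, so an unterminated quote consumes the rest) followed by a plain colon membership test.
import Mathlib
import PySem

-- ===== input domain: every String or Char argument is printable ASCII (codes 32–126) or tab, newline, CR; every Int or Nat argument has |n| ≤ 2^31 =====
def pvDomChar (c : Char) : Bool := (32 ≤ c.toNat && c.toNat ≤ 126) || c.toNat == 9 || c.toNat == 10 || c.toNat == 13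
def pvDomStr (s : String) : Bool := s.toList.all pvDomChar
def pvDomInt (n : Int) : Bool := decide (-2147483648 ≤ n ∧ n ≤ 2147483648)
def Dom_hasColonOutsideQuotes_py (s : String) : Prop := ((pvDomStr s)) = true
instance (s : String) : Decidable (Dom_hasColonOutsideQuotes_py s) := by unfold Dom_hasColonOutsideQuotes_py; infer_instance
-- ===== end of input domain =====

-- B replaces A's two-flag state machine by one regex deletion of quoted spans plus a ':' membership test (idiomatic; same O(n) cost).

-- ===== PORT A =====
-- A's for-loop over the characters with the two boolean flags, early return on ':'.
def pvLoopA : List Char → Bool → Bool → Bool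
  | [], _, _ => false
  | c :: rest, sq, dq =>
    if c = '\'' ∧ dq = false then pvLoopA rest (!sq) dq
    else if c = '"' ∧ sq = false then pvLoopA rest sq (!dq)
    else if c = ':' ∧ sq = false ∧ dq = false then true
    else pvLoopA rest sq dq

def hasColonOutsideQuotes_py (s : String) : Bool := pvLoopA s.toList false false

-- ===== PORT B =====
-- Hand port of re.sub(r"'[^']*'?|\"[^\"]*\"?", '', s): the regex has no Lean counterpart, so
-- its semantics are transcribed exactly — scanning left to right, at a quote character the
-- leftmost match greedily consumes through the matching closing quote (or, with the optional
-- closing quote absent, to the end of the string) and is deleted; other characters are kept.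
def pvDropAfter (q : Char) : List Char → List Char
  | [] => []
  | c :: rest => if c = q then rest else pvDropAfter q rest

theorem pvDropAfter_length_le (q : Char) : ∀ l : List Char, (pvDropAfter q l).length ≤ l.length
  | [] => Nat.le_refl _
  | c :: rest => by
    simp only [pvDropAfter]
    split
    · simp
    · exact Nat.le_succ_of_le (pvDropAfter_length_le q rest)

def pvStrip : List Char → List Char
  | [] => []
  | c :: rest =>
    if c = '\'' then pvStrip (pvDropAfter '\'' rest)
    else if c = '"' then pvStrip (pvDropAfter '"' rest)
    else c :: pvStrip rest
termination_by l => l.length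
decreasing_by
  · exact Nat.lt_succ_of_le (pvDropAfter_length_le _ rest)
  · exact Nat.lt_succ_of_le (pvDropAfter_length_le _ rest)
  · exact Nat.lt_succ_of_le (Nat.le_refl _)

def hasColonOutsideQuotes_py_alt (s : String) : Bool := (pvStrip s.toList).contains ':'

-- ===== PRECONDITION & SPEC =====
def Spec_hasColonOutsideQuotes_py (s : String) (out : Bool) : Prop := out = hasColonOutsideQuotes_py_alt s
instance (s : String) (out : Bool) : Decidable (Spec_hasColonOutsideQuotes_py s out) := by unfold Spec_hasColonOutsideQuotes_py; infer_instance

-- ===== CLAIM (what is proved, stated in full; the proofs are below) =====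
def Claim_equal_hasColonOutsideQuotes_py : Prop := ∀ (s : String), Dom_hasColonOutsideQuotes_py s → Spec_hasColonOutsideQuotes_py s (hasColonOutsideQuotes_py s)

-- ===== LEMMAS AND PROOFS =====

-- In single-quote mode A ignores everything until the closing single quote.
theorem pvLoopA_single : ∀ rest : List Char, pvLoopA rest true false = pvLoopA (pvDropAfter '\'' rest) false false
  | [] => rfl
  | c :: rest => by
    by_cases h : c = '\''
    · subst h; simp [pvLoopA, pvDropAfter]
    · simp only [pvLoopA, pvDropAfter, if_neg h]
      split_ifs with g1 g2 g3 <;> first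
        | exact pvLoopA_single rest
        | (exfalso; simp_all)

-- In double-quote mode A ignores everything until the closing double quote.
theorem pvLoopA_double : ∀ rest : List Char, pvLoopA rest false true = pvLoopA (pvDropAfter '"' rest) false false
  | [] => rfl
  | c :: rest => by
    by_cases h : c = '"'
    · subst h; simp [pvLoopA, pvDropAfter]
    · simp only [pvLoopA, pvDropAfter, if_neg h]
      split_ifs with g1 g2 g3 <;> first
        | exact pvLoopA_double rest
        | (exfalso; simp_all)

-- The state machine started with both flags off equals "a colon survives span deletion".
theorem pvLoopA_eq_strip : ∀ l : List Char, pvLoopA l false false = (pvStrip l).contains ':'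
  | [] => by rw [pvStrip]; rfl
  | c :: rest => by
    by_cases h1 : c = '\''
    · subst h1
      rw [pvStrip, if_pos rfl,
        show pvLoopA ('\'' :: rest) false false = pvLoopA rest true false by simp [pvLoopA],
        pvLoopA_single]
      exact pvLoopA_eq_strip (pvDropAfter '\'' rest)
    · by_cases h2 : c = '"'
      · subst h2
        rw [pvStrip, if_neg (by decide : ¬('"' : Char) = '\''), if_pos rfl,
          show pvLoopA ('"' :: rest) false false = pvLoopA rest false true by simp [pvLoopA],
          pvLoopA_double]
        exact pvLoopA_eq_strip (pvDropAfter '"' rest)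
      · rw [pvStrip, if_neg h1, if_neg h2]
        by_cases h3 : c = ':'
        · subst h3
          rw [show pvLoopA (':' :: rest) false false = true by simp [pvLoopA]]
          simp
        · rw [show pvLoopA (c :: rest) false false = pvLoopA rest false false by
            simp only [pvLoopA]
            split_ifs with g1 g2 g3 <;> first
              | rfl
              | (exfalso; simp_all),
          pvLoopA_eq_strip rest]
          simp [Ne.symm h3]
termination_by l => l.length
decreasing_by
  · exact Nat.lt_succ_of_le (pvDropAfter_length_le _ rest)
  · exact Nat.lt_succ_of_le (pvDropAfter_length_le _ rest)
  · exact Nat.lt_succ_of_le (Nat.le_refl _)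

-- ===== VERDICT (by name: the statement is the Claim_ definition above) =====
theorem hasColonOutsideQuotes_py_spec : Claim_equal_hasColonOutsideQuotes_py := by
  intro s _
  unfold Spec_hasColonOutsideQuotes_py hasColonOutsideQuotes_py hasColonOutsideQuotes_py_alt
  exact pvLoopA_eq_strip s.toList
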